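-- pv_equiv track=rewrite | github.com/pypi-data/pypi-mirror-401 | packages/quantrs2/quantrs2-0.1.0rc1.tar.gz/quantrs2-0.1.0rc1/python/quantrs2/circuit_optimization_cache.py | _normalize_sequence
-- ===== SOURCE A (Python) =====
-- from typing import Any, Dict, List, Optional, Union, Callable, Tuple, Set
--
-- def _normalize_sequence(sequence: List[str]) -> str:
--     """Normalize gate sequence for pattern matching."""
--     # Group consecutive identical gates
--     normalized = []
--     current_gate = None
--     count = 0
--
--     for gate in sequence:
--         # Normalize gate names
--         gate = gate.lower().replace('_', '').replace('-', '')
--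
--         if gate == current_gate:
--             count += 1
--         else:
--             if current_gate:
--                 if count > 1:
--                     normalized.append(f"{current_gate}*")
--                 else:
--                     normalized.append(current_gate)
--             current_gate = gate
--             count = 1
--
--     # Add the last group
--     if current_gate:
--         if count > 1:
--             normalized.append(f"{current_gate}*")
--         else:
--             normalized.append(current_gate)
--
--     return ":".join(normalized)
-- ===== SOURCE B (Python) =====
-- def _normalize_sequence(sequence):
--     """Normalize gate sequence for pattern matching."""
--     norm = [g.lower().replace('_', '').replace('-', '') for g in sequence]
--     # Neighbour view: a gate starts a run iff its predecessor differs; the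
--     # run has length > 1 iff its successor is equal.  No counters, no state.
--     prevs = [None] + norm[:-1]
--     nexts = norm[1:] + [None]
--     parts = [g + '*' if nxt == g else g
--              for prv, g, nxt in zip(prevs, norm, nexts)
--              if g and prv != g]
--     return ':'.join(parts)
-- ===== Notes on version B (the rewrite author's own statement) =====
-- stated objective: alternative
-- what changed: Replaces A's single-pass run-length state machine (current_gate/count with a duplicated flush block) by a stateless neighbour comparison: zip the normalized list with its shifted copies and emit one element per run start (predecessor differs), starred iff the successor is equal.
import Mathlib
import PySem

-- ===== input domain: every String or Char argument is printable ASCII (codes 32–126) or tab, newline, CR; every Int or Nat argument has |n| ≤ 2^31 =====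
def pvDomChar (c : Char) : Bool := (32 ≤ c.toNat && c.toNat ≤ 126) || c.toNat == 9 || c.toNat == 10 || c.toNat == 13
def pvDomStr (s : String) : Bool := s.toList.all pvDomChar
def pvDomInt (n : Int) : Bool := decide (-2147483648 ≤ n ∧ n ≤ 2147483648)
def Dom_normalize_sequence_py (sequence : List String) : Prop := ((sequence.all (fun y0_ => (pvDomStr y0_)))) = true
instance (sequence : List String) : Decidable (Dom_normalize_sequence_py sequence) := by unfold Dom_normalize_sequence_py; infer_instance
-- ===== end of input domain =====

-- B replaces A's run-length state machine (current_gate/count with a duplicated flush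
-- block) by a stateless neighbour comparison over the normalized list zipped with its
-- two shifted copies; same O(n) cost, different decomposition.

-- ===== PORT A =====
-- gate.lower().replace('_','').replace('-','')
def pvNorm (g : String) : String :=
  PySem.Str.replace (PySem.Str.replace (PySem.Str.lower g) "_" "") "-" ""

-- one iteration of A's for-loop body, on the already-normalized gate;
-- state = (normalized, current_gate, count); current_gate = none models Python's None
def pvStep (st : List String × Option String × Int) (gate : String) :
    List String × Option String × Int :=
  if some gate = st.2.1 then (st.1, st.2.1, st.2.2 + 1)
  else
    ((match st.2.1 with
      | some c => if c ≠ "" then st.1 ++ [if st.2.2 > 1 then c ++ "*" else c] else st.1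
      | none => st.1), some gate, 1)

-- the trailing "Add the last group" block of A
def pvFinal (st : List String × Option String × Int) : List String :=
  match st.2.1 with
  | some c => if c ≠ "" then st.1 ++ [if st.2.2 > 1 then c ++ "*" else c] else st.1
  | none => st.1

def normalize_sequence_py (sequence : List String) : String :=
  PySem.Str.join ":"
    (pvFinal (sequence.foldl (fun st gate => pvStep st (pvNorm gate)) ([], none, 0)))

-- ===== PORT B =====
-- one element of B's comprehension: (prv, g, nxt) ↦ [] (filtered out) or one rendered gate
def pvEmit (t : Option String × String × Option String) : List String :=
  if t.2.1 ≠ "" ∧ t.1 ≠ some t.2.1 then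
    [if t.2.2 = some t.2.1 then t.2.1 ++ "*" else t.2.1]
  else []

def normalize_sequence_py_alt (sequence : List String) : String :=
  let norm := sequence.map pvNorm
  let prevs : List (Option String) := none :: (PySem.List.slice norm none (some (-1))).map some
  let nexts : List (Option String) := (PySem.List.slice norm (some 1) none).map some ++ [none]
  PySem.Str.join ":" ((prevs.zip (norm.zip nexts)).flatMap pvEmit)

-- ===== PRECONDITION & SPEC =====
def Spec_normalize_sequence_py (sequence : List String) (out : String) : Prop := out = normalize_sequence_py_alt sequence
instance (sequence : List String) (out : String) : Decidable (Spec_normalize_sequence_py sequence out) := by unfold Spec_normalize_sequence_py; infer_instance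

-- ===== CLAIM =====
def Claim_equal_normalize_sequence_py : Prop := ∀ (sequence : List String), Dom_normalize_sequence_py sequence → Spec_normalize_sequence_py sequence (normalize_sequence_py sequence)

-- ===== LEMMAS AND PROOFS =====

-- recursive characterization of B's zipped comprehension: prv is threaded along
def pvZc : Option String → List String → List String
  | _, [] => []
  | p, g :: rest =>
      (if g ≠ "" ∧ p ≠ some g then [if rest.head? = some g then g ++ "*" else g] else [])
        ++ pvZc (some g) rest

lemma pv_zip_eq_zc (l : List String) (p : Option String) :
    ((p :: l.dropLast.map some).zip (l.zip (l.tail.map some ++ [none]))).flatMap pvEmit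
      = pvZc p l := by
  induction l generalizing p with
  | nil => rfl
  | cons g rest ih =>
    cases rest with
    | nil => simp [pvZc, pvEmit]
    | cons r rs =>
      have h := ih (p := some g)
      simp only [List.tail_cons] at h
      simp only [List.tail_cons, List.dropLast_cons_of_ne_nil (by simp : r :: rs ≠ []),
        List.map_cons, List.cons_append, List.zip_cons_cons, List.flatMap_cons]
      rw [h]
      simp [pvZc, pvEmit]

-- the render of a finished/pending group
def pvRB (g : String) (b : Bool) : List String :=
  if g = "" then [] else [if b then g ++ "*" else g]

-- A's loop from a pending group (g, c) vs the neighbour view of the rest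
lemma pv_loop (ys : List String) (acc : List String) (g : String) (c : Int) (hc : 1 ≤ c) :
    pvFinal (ys.foldl pvStep (acc, some g, c))
      = acc ++ pvRB g (decide (1 < c) || decide (ys.head? = some g)) ++ pvZc (some g) ys := by
  induction ys generalizing acc g c with
  | nil =>
    simp only [List.foldl, pvFinal, pvZc, List.head?, pvRB]
    by_cases h : g = "" <;> simp [h, List.append_nil]
  | cons y ys ih =>
    by_cases h : y = g
    · subst h
      simp only [List.foldl]
      rw [show pvStep (acc, some y, c) y = (acc, some y, c + 1) by simp [pvStep]]
      rw [ih acc y (c + 1) (by omega)]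
      have h1 : decide (1 < c + 1) = true := by simp; omega
      have h2 : (decide (1 < c) || decide ((y :: ys).head? = some y)) = true := by simp
      rw [h1, h2]
      simp [pvZc]
    · have hs : ¬ (some y = (some g : Option String)) := by simpa using h
      simp only [List.foldl, pvStep, if_neg hs]
      rw [ih _ y 1 le_rfl]
      simp only [pvZc]
      by_cases hg : g = "" <;> by_cases hy : y = "" <;>
        simp [pvRB, hg, hy, hs, Ne.symm h, List.append_assoc]

lemma pv_main (sequence : List String) :
    normalize_sequence_py sequence = normalize_sequence_py_alt sequence := by
  unfold normalize_sequence_py normalize_sequence_py_alt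
  simp only [PySem.List.slice_to_neg_one, PySem.List.slice_from_one]
  rw [show List.foldl (fun st gate => pvStep st (pvNorm gate)) ([], none, 0) sequence
        = List.foldl pvStep ([], none, 0) (sequence.map pvNorm) from (List.foldl_map ..).symm]
  rw [pv_zip_eq_zc]
  cases hsm : sequence.map pvNorm with
  | nil => rfl
  | cons x xs =>
    simp only [List.foldl]
    rw [show pvStep ([], none, 0) x = ([], some x, 1) by simp [pvStep]]
    rw [pv_loop xs [] x 1 le_rfl]
    simp only [pvZc, List.nil_append]
    by_cases hx : x = "" <;> by_cases hh : xs.head? = some x <;>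
      simp [pvRB, hx, hh]

-- ===== VERDICT =====
theorem normalize_sequence_py_spec : Claim_equal_normalize_sequence_py := by
  intro sequence _
  exact pv_main sequence
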